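-- pv_equiv track=rewrite | github.com/kad-ecoli/psiblast_baseline_CAFA | bin/a3m2msa.py | hhblits2msa
-- ===== SOURCE A (Python) =====
-- def hhblits2msa(hhblits_a3m=""):
--     '''convert HHsuite a3m format output text into FASTA format text'''
--     hhblits_msa=''
--     sequence=''
--     qlen=0
--     for block in hhblits_a3m.split('>')[1:]:
--         if not block.strip():
--             continue
--         Hit_id=block.split()[0]
--         if '|' in Hit_id:
--             Hit_id=Hit_id.split('|')[1]
--         Hsp_hseq=''.join(block.splitlines()[1:])
--         Hsp_hseq=''.join([res for res in Hsp_hseq if not ('a'<=res and res<='z')])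
--         if not sequence:
--             sequence=Hsp_hseq
--             qlen=len(sequence)
--         else:
--             aln_len=sum([not res in ".-" for res in Hsp_hseq])
--             Hsp_identity=sum([q==t for q,t in zip(sequence,Hsp_hseq)])
--             hhblits_msa+=">%s\t%d/%d\n%s\n"%(Hit_id,Hsp_identity,aln_len,Hsp_hseq)
--     return hhblits_msa
-- ===== SOURCE B (Python) =====
-- def hhblits2msa(hhblits_a3m=""):
--     '''convert HHsuite a3m format output text into FASTA format text'''
--     records = []
--     for block in hhblits_a3m.split('>')[1:]:
--         if not block.strip():
--             continue
--         hit_id = block.split()[0]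
--         if '|' in hit_id:
--             hit_id = hit_id.split('|')[1]
--         seq = ''.join(block.splitlines()[1:])
--         seq = ''.join(c for c in seq if not ('a' <= c <= 'z'))
--         records.append((hit_id, seq))
--     i = 0
--     while i < len(records) and not records[i][1]:
--         i += 1
--     if i == len(records):
--         return ''
--     query = records[i][1]
--     out = ['>%s\t%d/%d\n%s\n' % (hit_id,
--                                  sum(q == t for q, t in zip(query, seq)),
--                                  sum(c not in '.-' for c in seq),
--                                  seq)
--            for hit_id, seq in records[i + 1:]]
--     return ''.join(out)
-- ===== Notes on version B (the rewrite author's own statement) =====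
-- stated objective: simpler
-- what changed: A's single stateful fold that interleaves query detection with string concatenation is re-decomposed into three phases: parse all blocks into (id, sequence) records, scan for the first record with a nonempty filtered sequence as the query, then format the remaining records and join them once.
import Mathlib
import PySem

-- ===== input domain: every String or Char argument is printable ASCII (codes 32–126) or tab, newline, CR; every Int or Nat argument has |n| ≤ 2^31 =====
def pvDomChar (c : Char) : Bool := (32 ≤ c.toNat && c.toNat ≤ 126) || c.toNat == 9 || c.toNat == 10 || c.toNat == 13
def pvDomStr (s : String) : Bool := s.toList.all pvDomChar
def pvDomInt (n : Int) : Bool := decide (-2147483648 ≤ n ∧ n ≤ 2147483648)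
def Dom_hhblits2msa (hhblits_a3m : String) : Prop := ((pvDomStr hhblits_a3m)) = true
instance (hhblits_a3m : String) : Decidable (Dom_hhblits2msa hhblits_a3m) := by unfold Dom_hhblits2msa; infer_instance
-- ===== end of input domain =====

-- B re-decomposes A's single stateful accumulation loop into parse-records / select-query / format-and-join phases (objective: simpler).

-- ===== PORT A =====
-- state = (hhblits_msa, sequence, qlen); one step of A's for-loop over the '>'-blocks.
-- 'res in ".-"' on a single character is character membership; ported as res = '.' ∨ res = '-' (exact).
def pvAStep (st : List Char × List Char × Int) (block : List Char) : List Char × List Char × Int :=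
  if PySem.Chars.strip block = [] then st          -- if not block.strip(): continue
  else
    let Hit_id0 := (PySem.Chars.split₀ block).headD []   -- block.split()[0]; nonempty since block.strip() is nonempty
    let Hit_id := if PySem.Chars.isIn ['|'] Hit_id0 then (PySem.Chars.splitOn Hit_id0 ['|']).getD 1 [] else Hit_id0
    let Hsp_hseq0 := PySem.Chars.join [] ((PySem.Chars.splitlines block).drop 1)
    let Hsp_hseq := Hsp_hseq0.filter (fun res => !(decide ('a' ≤ res) && decide (res ≤ 'z')))
    if st.2.1 = [] then (st.1, Hsp_hseq, (Hsp_hseq.length : Int))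
    else
      let aln_len := (Hsp_hseq.map (fun res => if res = '.' ∨ res = '-' then (0:Int) else 1)).sum
      let ident := ((st.2.1.zip Hsp_hseq).map (fun p => if p.1 = p.2 then (1:Int) else 0)).sum
      (st.1 ++ '>' :: Hit_id ++ '\t' :: PySem.Int.toChars ident ++ '/' :: PySem.Int.toChars aln_len
         ++ '\n' :: Hsp_hseq ++ ['\n'], st.2.1, st.2.2)

def hhblits2msa (hhblits_a3m : String) : String :=
  String.ofList (((PySem.Chars.splitOn hhblits_a3m.toList ['>']).drop 1).foldl pvAStep ([], [], 0)).1

-- ===== PORT B =====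
-- one record per non-blank block: (hit_id, lowercase-filtered aligned sequence)
def pvParse (block : List Char) : Option (List Char × List Char) :=
  if PySem.Chars.strip block = [] then none
  else
    let hit0 := (PySem.Chars.split₀ block).headD []   -- block.split()[0]; nonempty since block.strip() is nonempty
    let hit := if PySem.Chars.isIn ['|'] hit0 then (PySem.Chars.splitOn hit0 ['|']).getD 1 [] else hit0
    let seq0 := PySem.Chars.join [] ((PySem.Chars.splitlines block).drop 1)
    some (hit, seq0.filter (fun res => !(decide ('a' ≤ res) && decide (res ≤ 'z'))))

-- B's while-loop scan for the first record with a nonempty sequence (the query), returning it with the remaining records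
def pvFindQuery : List (List Char × List Char) → Option (List Char × List (List Char × List Char))
  | [] => none
  | r :: rest => if r.2 = [] then pvFindQuery rest else some (r.2, rest)

-- '>%s\t%d/%d\n%s\n' % (hit_id, ident, aln_len, seq)
def pvFmt (query : List Char) (rec : List Char × List Char) : List Char :=
  '>' :: rec.1 ++ '\t'
    :: PySem.Int.toChars (((query.zip rec.2).map (fun p => if p.1 = p.2 then (1:Int) else 0)).sum)
    ++ '/' :: PySem.Int.toChars ((rec.2.map (fun res => if res = '.' ∨ res = '-' then (0:Int) else 1)).sum)
    ++ '\n' :: rec.2 ++ ['\n']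

def hhblits2msa_alt (hhblits_a3m : String) : String :=
  match pvFindQuery (((PySem.Chars.splitOn hhblits_a3m.toList ['>']).drop 1).filterMap pvParse) with
  | none => ""
  | some (q, tail) => String.ofList (List.flatten (tail.map (pvFmt q)))

-- ===== PRECONDITION & SPEC =====
def Spec_hhblits2msa (hhblits_a3m : String) (out : String) : Prop := out = hhblits2msa_alt hhblits_a3m
instance (hhblits_a3m : String) (out : String) : Decidable (Spec_hhblits2msa hhblits_a3m out) := by unfold Spec_hhblits2msa; infer_instance

-- ===== CLAIM (what is proved, stated in full; the proofs are below) =====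
def Claim_equal_hhblits2msa : Prop := ∀ (hhblits_a3m : String), Dom_hhblits2msa hhblits_a3m → Spec_hhblits2msa hhblits_a3m (hhblits2msa hhblits_a3m)

-- ===== LEMMAS AND PROOFS =====

-- the filtered aligned sequence and the hit id of a block (proof-side names for the common subterms of both ports)
def pvSeq (b : List Char) : List Char :=
  (PySem.Chars.join [] ((PySem.Chars.splitlines b).drop 1)).filter
    (fun res => !(decide ('a' ≤ res) && decide (res ≤ 'z')))

def pvHit (b : List Char) : List Char :=
  let h0 := (PySem.Chars.split₀ b).headD []
  if PySem.Chars.isIn ['|'] h0 then (PySem.Chars.splitOn h0 ['|']).getD 1 [] else h0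

lemma pvParse_of_blank (b : List Char) (hs : PySem.Chars.strip b = []) : pvParse b = none := by
  unfold pvParse; rw [if_pos hs]

lemma pvParse_of_ne (b : List Char) (hs : PySem.Chars.strip b ≠ []) :
    pvParse b = some (pvHit b, pvSeq b) := by
  unfold pvParse pvHit pvSeq; rw [if_neg hs]

lemma pvAStep_skip (st : List Char × List Char × Int) (b : List Char)
    (hs : PySem.Chars.strip b = []) : pvAStep st b = st := by
  unfold pvAStep; rw [if_pos hs]

lemma pvAStep_query (msa : List Char) (ql : Int) (b : List Char)
    (hs : PySem.Chars.strip b ≠ []) :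
    pvAStep (msa, [], ql) b = (msa, pvSeq b, ((pvSeq b).length : Int)) := by
  unfold pvAStep pvSeq; rw [if_neg hs]; rfl

lemma pvAStep_hit (msa q : List Char) (ql : Int) (b : List Char) (hq : q ≠ [])
    (hs : PySem.Chars.strip b ≠ []) :
    pvAStep (msa, q, ql) b = (msa ++ pvFmt q (pvHit b, pvSeq b), q, ql) := by
  unfold pvAStep pvFmt pvHit pvSeq; rw [if_neg hs]
  show (if q = [] then _ else _) = _
  rw [if_neg hq]
  simp [List.append_assoc]

-- after the query is fixed (sequence ≠ ''), A's loop appends exactly B's formatted records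
lemma pvFoldl_after_query (blocks : List (List Char)) (msa q : List Char) (ql : Int) (hq : q ≠ []) :
    blocks.foldl pvAStep (msa, q, ql)
      = (msa ++ List.flatten ((blocks.filterMap pvParse).map (pvFmt q)), q, ql) := by
  induction blocks generalizing msa with
  | nil => simp
  | cons b rest ih =>
    by_cases hs : PySem.Chars.strip b = []
    · rw [List.foldl_cons, pvAStep_skip _ _ hs, List.filterMap_cons_none (pvParse_of_blank b hs)]
      exact ih msa
    · rw [List.foldl_cons, pvAStep_hit msa q ql b hq hs, ih,
          List.filterMap_cons_some (pvParse_of_ne b hs)]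
      simp [List.append_assoc]

-- the whole of A equals B's three-phase pipeline, block list by block list
lemma pvFoldl_eq_pipeline (blocks : List (List Char)) :
    (blocks.foldl pvAStep ([], [], 0)).1
      = (match pvFindQuery (blocks.filterMap pvParse) with
         | none => []
         | some (q, tail) => List.flatten (tail.map (pvFmt q))) := by
  induction blocks with
  | nil => rfl
  | cons b rest ih =>
    by_cases hs : PySem.Chars.strip b = []
    · rw [List.foldl_cons, pvAStep_skip _ _ hs, List.filterMap_cons_none (pvParse_of_blank b hs)]
      exact ih
    · rw [List.foldl_cons, List.filterMap_cons_some (pvParse_of_ne b hs)]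
      by_cases he : pvSeq b = []
      · rw [pvAStep_query [] 0 b hs, he]
        show (List.foldl pvAStep ([], [], 0) rest).1 = _
        rw [ih]
        rfl
      · rw [pvAStep_query [] 0 b hs, pvFoldl_after_query rest [] (pvSeq b) _ he]
        show [] ++ _ = _
        rw [List.nil_append]
        conv_rhs => rw [show pvFindQuery ((pvHit b, pvSeq b) :: rest.filterMap pvParse)
          = some (pvSeq b, rest.filterMap pvParse) from by unfold pvFindQuery; rw [if_neg he]]

-- ===== VERDICT (by name: the statement is the Claim_ definition above) =====
theorem hhblits2msa_spec : Claim_equal_hhblits2msa := by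
  intro s _
  unfold Spec_hhblits2msa hhblits2msa hhblits2msa_alt
  rw [pvFoldl_eq_pipeline]
  cases h : pvFindQuery (((PySem.Chars.splitOn s.toList ['>']).drop 1).filterMap pvParse) with
  | none => rfl
  | some qt => obtain ⟨q, t⟩ := qt; rfl
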